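-- pv_equiv track=rewrite | github.com/redteamrover/leetcode | 1423-Maximum-Points-You-Can-Obtain-From-Cards/solution.py | recursive_subproblem
-- ===== SOURCE A (Python) =====
-- from typing import Callable, Dict, List, Optional, Tuple
--
-- def recursive_subproblem(card_points: List[int], k: int, cache: Optional[Dict[Tuple[Tuple[int, ...], int], int]] = None) -> int:
--     """Maximum Score: Recursive Subproblem Solution
--
--     This function returns the maximum score of two possible scenarios:
--
--         1. The resulting score is maximized by taking the front card, or
--         2. The resulting score is maximized by taking the back card.
--
--     While similar in spirit to the incorrect naive implementation, this
--     solution is different because it explicitly calculates both possibilities,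
--     rather than only one.
--
--     This function therefore has a O(2^N) runtime complexity when implemented
--     without any memoization.
--
--     TODO: Figure out if the cache is actually even doing anything. I don't
--     think it is, because the state is unique enough on each call that it's not
--     actually helping.
--     """
--     # The base case for this recursion is whether there are cards left to pick
--     # from or we have run out of selections to make.
--     if not card_points or not k:
--         return 0
--
--     # Create a tuple of the function arguments to use as the hash table key.
--     #
--     # The key must be a tuple rather than a list because lists are mutable, and
--     # they are thus not hashable.
--     state = tuple((tuple(card_points), k))
--
--     # If no cache object was supplied, we initialize one and use it for all of
--     # the subcalls.
--     if cache is None: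
--         cache = {}
--
--     # Otherwise, check whether the cache contains elements already. If it does,
--     # check whether the current scenario has already been cached.
--     if not cache or state not in cache:
--         # Cache the result of this selection for future reference, making sure
--         # to pass in the cache for future use.
--         cache[state] = max(
--             card_points[0] + recursive_subproblem(card_points[1:], k-1, cache),
--             card_points[-1] + recursive_subproblem(card_points[:-1], k-1, cache)
--         )
--
--     # Return the maximum of the two resulting scores, depending on whether it
--     # is better to select the card in the front or the card in the back.
--     return cache[state]
-- ===== SOURCE B (Python) =====
-- def recursive_subproblem(card_points, k, cache=None):
--     n = len(card_points)
--     t = min(k, n)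
--     s = sum(card_points[:t])
--     best = s
--     for i in range(1, t + 1):
--         s += card_points[n - i] - card_points[t - i]
--         if best < s:
--             best = s
--     return best
-- ===== Notes on version B (the rewrite author's own statement) =====
-- stated objective: faster
-- what changed: A's exponential two-branch recursion over all take-front/take-back orders (with an ineffective tuple-keyed memo) is replaced by prefix-sum sliding window: sum the first min(k,n) cards once, then slide the front/back split in one O(n) pass taking the maximum; Pre_ excludes negative k (a card count, outside the natural domain) and caches pre-seeded with a reachable subproblem key (there A parrots the seeded value instead of computing).
-- outside the precondition, e.g. on recursive_subproblem([1, 2], 1, {((1, 2), 1): 99}): A returns 99, B returns 2; on recursive_subproblem([1, 2, 3], 2, {((2, 3), 1): 50}): A returns 51, B returns 5; on recursive_subproblem([1, 2], -1, None): A returns 3, B returns 1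
import Mathlib
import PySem

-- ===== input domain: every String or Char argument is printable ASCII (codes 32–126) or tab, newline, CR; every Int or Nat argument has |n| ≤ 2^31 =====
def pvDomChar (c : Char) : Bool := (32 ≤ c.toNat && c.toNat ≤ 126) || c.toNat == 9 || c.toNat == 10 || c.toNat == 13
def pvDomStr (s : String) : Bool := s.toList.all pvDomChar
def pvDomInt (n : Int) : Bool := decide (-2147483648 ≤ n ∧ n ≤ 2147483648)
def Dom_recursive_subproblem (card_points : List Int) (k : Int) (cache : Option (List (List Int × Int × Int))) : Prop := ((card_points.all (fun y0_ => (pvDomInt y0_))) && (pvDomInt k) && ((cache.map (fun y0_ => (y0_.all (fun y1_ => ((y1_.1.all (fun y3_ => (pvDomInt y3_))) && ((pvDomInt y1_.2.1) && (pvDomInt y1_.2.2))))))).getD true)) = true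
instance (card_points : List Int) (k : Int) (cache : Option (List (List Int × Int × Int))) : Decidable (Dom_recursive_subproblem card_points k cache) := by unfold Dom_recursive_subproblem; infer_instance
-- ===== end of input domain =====

-- B replaces A's exponential take-front/take-back recursion by one linear sliding-window pass
-- over the front-i/back-(t-i) splits; equivalence is about the RETURN value only (A mutates a
-- caller-supplied cache dict in place, B does not touch it).

-- ===== PORT A =====
-- Python's mutable memo dict is threaded through the recursion as explicit state.
def pvGoA (cp : List Int) (k : Int) (cache : PySem.Dict (List Int × Int) Int) :
    Int × PySem.Dict (List Int × Int) Int :=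
  -- if not card_points or not k: return 0
  if h : cp = [] ∨ k = 0 then (0, cache)
  else
    -- state = tuple((tuple(card_points), k))
    let state := (cp, k)
    -- if not cache or state not in cache:
    if cache.items = [] ∨ cache.contains state = false then
      -- cache[state] = max(card_points[0] + rec(card_points[1:], k-1, cache),
      --                    card_points[-1] + rec(card_points[:-1], k-1, cache))
      let r1 := pvGoA (PySem.List.slice cp (some 1) none) (k - 1) cache
      let r2 := pvGoA (PySem.List.slice cp none (some (-1))) (k - 1) r1.2
      let v := max (PySem.List.pyGetD cp 0 0 + r1.1) (PySem.List.pyGetD cp (-1) 0 + r2.1)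
      let cache' := r2.2.insert state v
      -- return cache[state]   (the key was just set, so the lookup cannot raise)
      (cache'.getD state 0, cache')
    else (cache.getD state 0, cache)
termination_by cp.length
decreasing_by
  · simp only [PySem.List.slice_from_one, List.length_tail]
    cases cp with
    | nil => simp at h
    | cons a l => simp
  · simp only [PySem.List.slice_to_neg_one, List.length_dropLast]
    cases cp with
    | nil => simp at h
    | cons a l => simp

-- the association-list argument arrives in Python as a dict: built key-by-key in order
def pvInitCache (cache : Option (List (List Int × Int × Int))) : PySem.Dict (List Int × Int) Int :=
  (cache.getD []).foldl (fun d e => d.insert (e.1, e.2.1) e.2.2) PySem.Dict.empty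

def recursive_subproblem (card_points : List Int) (k : Int) (cache : Option (List (List Int × Int × Int))) : Int :=
  (pvGoA card_points k (pvInitCache cache)).1

-- ===== PORT B =====
def recursive_subproblem_alt (card_points : List Int) (k : Int) (cache : Option (List (List Int × Int × Int))) : Int :=
  let n : Int := PySem.List.len card_points
  let t : Int := min k n
  let s0 : Int := (PySem.List.slice card_points none (some t)).sum
  let r := (PySem.List.pyRange 1 (t + 1) 1).foldl
    (fun (st : Int × Int) i =>
      let s := st.2 + PySem.List.pyGetD card_points (n - i) 0
                    - PySem.List.pyGetD card_points (t - i) 0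
      (if st.1 < s then s else st.1, s)) (s0, s0)
  r.1

-- ===== PRECONDITION & SPEC =====
-- Pre_ restricts k to the task's natural domain (a count of cards to take, so 0 ≤ k; A happens
-- to return a value for negative k too, but such a count is outside the problem's meaning), and
-- excludes calls whose caller-supplied cache already holds an entry keyed by a reachable
-- non-base subproblem state (a contiguous infix of card_points at the matching recursion
-- depth): there A returns whatever value the caller seeded instead of computing, an unspecified
-- corner of the memo argument, while B computes the true maximum score.
def Pre_recursive_subproblem (card_points : List Int) (k : Int) (cache : Option (List (List Int × Int × Int))) : Prop :=
  0 ≤ k ∧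
  ∀ e ∈ (cache.getD []), ¬ (e.1 <:+: card_points ∧
    e.2.1 = k - ((card_points.length : Int) - (e.1.length : Int)) ∧ e.1 ≠ [] ∧ e.2.1 ≠ 0)
instance (card_points : List Int) (k : Int) (cache : Option (List (List Int × Int × Int))) : Decidable (Pre_recursive_subproblem card_points k cache) := by unfold Pre_recursive_subproblem; infer_instance

def pvWitness_recursive_subproblem : List Int × Int × (Option (List (List Int × Int × Int))) :=
  ([1, 2, 3, 1], 3, none)

def Spec_recursive_subproblem (card_points : List Int) (k : Int) (cache : Option (List (List Int × Int × Int))) (out : Int) : Prop := out = recursive_subproblem_alt card_points k cache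
instance (card_points : List Int) (k : Int) (cache : Option (List (List Int × Int × Int))) (out : Int) : Decidable (Spec_recursive_subproblem card_points k cache out) := by unfold Spec_recursive_subproblem; infer_instance

-- ===== CLAIM (what is proved, stated in full; the proofs are below) =====
def Claim_equal_recursive_subproblem : Prop := ∀ (card_points : List Int) (k : Int) (cache : Option (List (List Int × Int × Int))), Dom_recursive_subproblem card_points k cache → Pre_recursive_subproblem card_points k cache → Spec_recursive_subproblem card_points k cache (recursive_subproblem card_points k cache)

-- ===== LEMMAS AND PROOFS =====

-- the common mathematical value: pvT = number of cards actually taken,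
-- pvG cp t i = sum of the first i plus the last (t-i) cards, pvF = max over i ≤ t.
def pvT (cp : List Int) (k : Int) : Nat := if k < 0 then cp.length else min k.toNat cp.length

def pvG (cp : List Int) (t i : Nat) : Int := (cp.take i).sum + (cp.drop (cp.length - (t - i))).sum

def pvMaxOver (f : Nat → Int) : Nat → Int
  | 0 => f 0
  | t + 1 => max (pvMaxOver f t) (f (t + 1))

def pvF (cp : List Int) (k : Int) : Int := pvMaxOver (pvG cp (pvT cp k)) (pvT cp k)

-- A-side: an entry of the threaded cache matters only when it is keyed by a reachable
-- non-base state of the top-level call (cp0, k0); pvInv says all such entries are correct.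
def pvGood (cp0 : List Int) (k0 : Int) (l : List Int) (j : Int) : Prop :=
  l <:+: cp0 ∧ j = k0 - ((cp0.length : Int) - (l.length : Int)) ∧ l ≠ [] ∧ j ≠ 0

def pvInv (cp0 : List Int) (k0 : Int) (d : PySem.Dict (List Int × Int) Int) : Prop :=
  ∀ l j v, d.get? (l, j) = some v → pvGood cp0 k0 l j → v = pvF l j

theorem le_pvMaxOver (f : Nat → Int) (t i : Nat) (h : i ≤ t) : f i ≤ pvMaxOver f t := by
  induction t with
  | zero => simp_all [pvMaxOver]
  | succ t ih =>
    rw [pvMaxOver]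
    rcases Nat.lt_or_ge i (t + 1) with h' | h'
    · exact le_max_of_le_left (ih (by omega))
    · have : i = t + 1 := by omega
      subst this; exact le_max_right _ _

theorem pvMaxOver_exists (f : Nat → Int) (t : Nat) : ∃ i, i ≤ t ∧ pvMaxOver f t = f i := by
  induction t with
  | zero => exact ⟨0, le_refl 0, rfl⟩
  | succ t ih =>
    obtain ⟨i, hi, hv⟩ := ih
    rw [pvMaxOver]
    rcases max_cases (pvMaxOver f t) (f (t + 1)) with ⟨h1, _⟩ | ⟨h1, _⟩
    · exact ⟨i, by omega, by rw [h1, hv]⟩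
    · exact ⟨t + 1, le_refl _, h1⟩

theorem pvMaxOver_congr (f g : Nat → Int) (t : Nat) (h : ∀ i, i ≤ t → f i = g i) :
    pvMaxOver f t = pvMaxOver g t := by
  induction t with
  | zero => simpa [pvMaxOver] using h 0 (le_refl 0)
  | succ t ih =>
    rw [pvMaxOver, pvMaxOver, ih (fun i hi => h i (by omega)), h (t + 1) (le_refl _)]

theorem add_pvMaxOver (c : Int) (f : Nat → Int) (t : Nat) :
    c + pvMaxOver f t = pvMaxOver (fun i => c + f i) t := by
  induction t with
  | zero => rfl
  | succ t ih => rw [pvMaxOver, pvMaxOver, ← ih]; omega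

theorem pvMaxOver_split (f : Nat → Int) (t : Nat) :
    pvMaxOver f (t + 1) = max (pvMaxOver (fun i => f (i + 1)) t) (pvMaxOver f t) := by
  apply le_antisymm
  · obtain ⟨i, hi, hv⟩ := pvMaxOver_exists f (t + 1)
    rw [hv]
    rcases Nat.eq_zero_or_pos i with h0 | h0
    · subst h0; exact le_max_of_le_right (le_pvMaxOver f t 0 (by omega))
    · obtain ⟨j, rfl⟩ := Nat.exists_eq_add_of_le h0
      have := le_pvMaxOver (fun i => f (i + 1)) t j (by omega)
      simp only [Nat.add_comm 1 j] at *
      exact le_max_of_le_left this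
  · apply max_le
    · obtain ⟨i, hi, hv⟩ := pvMaxOver_exists (fun i => f (i + 1)) t
      rw [hv]; exact le_pvMaxOver f (t + 1) (i + 1) (by omega)
    · obtain ⟨i, hi, hv⟩ := pvMaxOver_exists f t
      rw [hv]; exact le_pvMaxOver f (t + 1) i (by omega)

theorem pvMaxOver_reflect (f : Nat → Int) (t : Nat) :
    pvMaxOver (fun i => f (t - i)) t = pvMaxOver f t := by
  apply le_antisymm
  · obtain ⟨i, hi, hv⟩ := pvMaxOver_exists (fun i => f (t - i)) t
    rw [hv]; exact le_pvMaxOver f t (t - i) (by omega)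
  · obtain ⟨i, hi, hv⟩ := pvMaxOver_exists f t
    rw [hv]
    have : f i = (fun j => f (t - j)) (t - i) := by simp [Nat.sub_sub_self hi]
    rw [this]; exact le_pvMaxOver _ t (t - i) (by omega)

theorem pvG_front (a : Int) (l : List Int) (t i : Nat) (h1 : i + 1 ≤ t) (h2 : t ≤ l.length + 1) :
    pvG (a :: l) t (i + 1) = a + pvG l (t - 1) i := by
  unfold pvG
  have hd : l.length + 1 - (t - (i + 1)) = (l.length - ((t - 1) - i)) + 1 := by omega
  simp only [List.take_succ_cons, List.sum_cons, List.length_cons, hd, List.drop_succ_cons]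
  ring

theorem pvG_back (b : Int) (ys : List Int) (t i : Nat) (h0 : 1 ≤ t) (h1 : i ≤ t - 1) (h2 : t ≤ ys.length + 1) :
    pvG (ys ++ [b]) t i = b + pvG ys (t - 1) i := by
  unfold pvG
  have hi : i ≤ ys.length := by omega
  have hj : (ys ++ [b]).length - (t - i) = ys.length - ((t - 1) - i) := by simp; omega
  have hjl : ys.length - ((t - 1) - i) ≤ ys.length := by omega
  rw [List.take_append_of_le_length hi, hj, List.drop_append_of_le_length hjl]
  simp; ring

theorem pvT_pos (cp : List Int) (k : Int) (h : cp ≠ []) (hk : k ≠ 0) : 1 ≤ pvT cp k := by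
  have h1 : 0 < cp.length := List.length_pos_of_ne_nil h
  unfold pvT; split_ifs with h'
  · omega
  · have : 1 ≤ k.toNat := by omega
    omega

theorem pvT_le (cp : List Int) (k : Int) : pvT cp k ≤ cp.length := by
  unfold pvT; split_ifs <;> omega

theorem pvT_tail (cp : List Int) (k : Int) (h : cp ≠ []) (hk : k ≠ 0) :
    pvT cp.tail (k - 1) = pvT cp k - 1 := by
  have hl : cp.tail.length = cp.length - 1 := by simp
  have hn : 1 ≤ cp.length := List.length_pos_of_ne_nil h
  unfold pvT; rw [hl]; split_ifs <;> omega

theorem pvT_dropLast (cp : List Int) (k : Int) (h : cp ≠ []) (hk : k ≠ 0) :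
    pvT cp.dropLast (k - 1) = pvT cp k - 1 := by
  have hl : cp.dropLast.length = cp.length - 1 := by simp
  have hn : 1 ≤ cp.length := List.length_pos_of_ne_nil h
  unfold pvT; rw [hl]; split_ifs <;> omega

theorem pvF_base (cp : List Int) (k : Int) (h : cp = [] ∨ k = 0) : pvF cp k = 0 := by
  rcases h with h | h
  · subst h
    have : pvT [] k = 0 := by simp [pvT]
    simp [pvF, this, pvMaxOver, pvG]
  · subst h
    have : pvT cp 0 = 0 := by simp [pvT]
    simp [pvF, this, pvMaxOver, pvG]

theorem pvF_rec (cp : List Int) (k : Int) (h : cp ≠ []) (hk : k ≠ 0) :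
    pvF cp k = max (PySem.List.pyGetD cp 0 0 + pvF cp.tail (k - 1))
               (PySem.List.pyGetD cp (-1) 0 + pvF cp.dropLast (k - 1)) := by
  have hn : 1 ≤ cp.length := List.length_pos_of_ne_nil h
  have ht1 := pvT_pos cp k h hk
  have htn := pvT_le cp k
  set t := pvT cp k with hT
  unfold pvF
  rw [pvT_tail cp k h hk, pvT_dropLast cp k h hk, ← hT]
  have hsplit : pvMaxOver (pvG cp t) t = max (pvMaxOver (fun i => pvG cp t (i + 1)) (t - 1)) (pvMaxOver (pvG cp t) (t - 1)) := by
    have : t = (t - 1) + 1 := by omega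
    rw [this, pvMaxOver_split]
    congr 2
  rw [hsplit]
  congr 1
  · -- front branch
    obtain ⟨a, l, rfl⟩ := List.exists_cons_of_ne_nil h
    rw [PySem.List.pyGetD_zero_cons, add_pvMaxOver]
    apply pvMaxOver_congr
    intro i hi
    rw [List.tail_cons]
    exact pvG_front a l t i (by omega) (by simpa using htn)
  · -- back branch
    rcases List.eq_nil_or_concat cp with rfl | ⟨ys, b, rfl⟩
    · exact absurd rfl h
    simp only [List.concat_eq_append] at *
    rw [PySem.List.pyGetD_neg_one_append_singleton, add_pvMaxOver]
    apply pvMaxOver_congr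
    intro i hi
    rw [List.dropLast_concat]
    exact pvG_back b ys t i ht1 (by omega) (by simpa using htn)

theorem pvGoA_correct (cp0 : List Int) (k0 : Int) :
    ∀ N cp k d, cp.length ≤ N → cp <:+: cp0 →
      k = k0 - ((cp0.length : Int) - (cp.length : Int)) → pvInv cp0 k0 d →
      (pvGoA cp k d).1 = pvF cp k ∧ pvInv cp0 k0 (pvGoA cp k d).2 := by
  intro N
  induction N with
  | zero =>
    intro cp k d hN hinf hk hinv
    have hcp : cp = [] := by cases cp <;> simp_all
    subst hcp
    rw [pvGoA]
    simp only [dif_pos (Or.inl rfl)]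
    exact ⟨(pvF_base [] k (Or.inl rfl)).symm, hinv⟩
  | succ N ih =>
    intro cp k d hN hinf hk hinv
    rw [pvGoA]
    by_cases hb : cp = [] ∨ k = 0
    · simp only [dif_pos hb]
      exact ⟨(pvF_base cp k hb).symm, hinv⟩
    · simp only [dif_neg hb]
      push_neg at hb
      obtain ⟨hne, hk0⟩ := hb
      have hlen : cp.length ≤ cp0.length := hinf.length_le
      have hpos : 0 < cp.length := List.length_pos_of_ne_nil hne
      by_cases hc : d.items = [] ∨ d.contains (cp, k) = false
      · simp only [if_pos hc, PySem.List.slice_from_one, PySem.List.slice_to_neg_one]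
        have htlL : cp.tail.length = cp.length - 1 := by simp
        have hdlL : cp.dropLast.length = cp.length - 1 := by simp
        obtain ⟨e1, i1⟩ := ih cp.tail (k - 1) d (by omega)
          ((List.tail_suffix cp).isInfix.trans hinf) (by rw [htlL]; omega) hinv
        obtain ⟨e2, i2⟩ := ih cp.dropLast (k - 1) _ (by omega)
          ((List.dropLast_prefix cp).isInfix.trans hinf) (by rw [hdlL]; omega) i1
        rw [e1, e2]
        constructor
        · simp only [PySem.Dict.getD_insert_self]
          exact (pvF_rec cp k hne hk0).symm
        · intro l j w hw hg
          rw [PySem.Dict.get?_insert] at hw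
          split at hw
          · rename_i heq
            obtain ⟨hl, hj⟩ := Prod.mk.inj heq
            rw [hl, hj, pvF_rec cp k hne hk0]
            exact (Option.some.inj hw).symm
          · exact i2 l j w hw hg
      · simp only [if_neg hc]
        refine ⟨?_, hinv⟩
        push_neg at hc
        have hcont : d.contains (cp, k) = true := by
          cases hcb : d.contains (cp, k) with
          | false => exact absurd hcb hc.2
          | true => rfl
        rw [PySem.Dict.contains_eq_isSome_get?] at hcont
        obtain ⟨v, hv⟩ := Option.isSome_iff_exists.mp hcont
        rw [PySem.Dict.getD_eq_get?_getD, hv]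
        exact hinv cp k v hv ⟨hinf, hk, hne, hk0⟩

theorem pvGet?_foldl_insert (l : List (List Int × Int × Int)) :
    ∀ (d : PySem.Dict (List Int × Int) Int) key v,
      (l.foldl (fun d e => d.insert (e.1, e.2.1) e.2.2) d).get? key = some v →
      d.get? key = some v ∨ ∃ e ∈ l, (e.1, e.2.1) = key := by
  induction l with
  | nil => intro d key v h; exact Or.inl h
  | cons e l ih =>
    intro d key v h
    rw [List.foldl_cons] at h
    rcases ih _ key v h with h' | ⟨e', he', hk⟩
    · rw [PySem.Dict.get?_insert] at h'
      split at h'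
      · rename_i heq
        exact Or.inr ⟨e, List.mem_cons_self, heq.symm ▸ rfl⟩
      · exact Or.inl h'
    · exact Or.inr ⟨e', List.mem_cons_of_mem e he', hk⟩

theorem pvInitCache_inv (cp : List Int) (k : Int) (cache : Option (List (List Int × Int × Int)))
    (hp : ∀ e ∈ (cache.getD []), ¬ (e.1 <:+: cp ∧
      e.2.1 = k - ((cp.length : Int) - (e.1.length : Int)) ∧ e.1 ≠ [] ∧ e.2.1 ≠ 0)) :
    pvInv cp k (pvInitCache cache) := by
  intro l j v hv hg
  rcases pvGet?_foldl_insert (cache.getD []) PySem.Dict.empty (l, j) v hv with h | ⟨e, he, hk⟩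
  · simp [PySem.Dict.get?_empty] at h
  · obtain ⟨h1, h2⟩ := Prod.mk.inj hk
    exact absurd ⟨h1 ▸ hg.1, by rw [h2, h1]; exact hg.2.1, h1 ▸ hg.2.2.1, h2 ▸ hg.2.2.2⟩ (hp e he)

theorem pvG_step (cp : List Int) (t i : Nat) (h1 : 1 ≤ i) (h2 : i ≤ t) (h3 : t ≤ cp.length) :
    pvG cp t (t - i) = pvG cp t (t - i + 1)
      + cp.getD (cp.length - i) 0 - cp.getD (t - i) 0 := by
  have hji : t - (t - i) = i := by omega
  have hji2 : t - (t - i + 1) = i - 1 := by omega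
  have hlt : t - i < cp.length := by omega
  have hlt2 : cp.length - i < cp.length := by omega
  have hd : cp.length - (i - 1) = (cp.length - i) + 1 := by omega
  unfold pvG
  rw [hji, hji2, hd, List.sum_take_succ cp (t - i) hlt,
      List.drop_eq_getElem_cons hlt2, List.sum_cons,
      List.getD_eq_getElem cp 0 hlt, List.getD_eq_getElem cp 0 hlt2]
  ring

theorem pvLoopLem (cp : List Int) (t : Nat) (ht : t ≤ cp.length) :
    ∀ m : Nat, m ≤ t →
    (PySem.List.pyRange 1 ((m : Int) + 1) 1).foldl
      (fun (st : Int × Int) i =>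
        let s := st.2 + PySem.List.pyGetD cp ((cp.length : Int) - i) 0
                      - PySem.List.pyGetD cp ((t : Int) - i) 0
        (if st.1 < s then s else st.1, s)) (pvG cp t t, pvG cp t t)
    = (pvMaxOver (fun i => pvG cp t (t - i)) m, pvG cp t (t - m)) := by
  intro m
  induction m with
  | zero =>
    intro _
    rw [show ((0 : Nat) : Int) + 1 = 1 by norm_num, PySem.List.pyRange_one_eq_nil (le_refl 1)]
    simp [pvMaxOver]
  | succ m ih =>
    intro hm
    have hcast : ((m + 1 : Nat) : Int) + 1 = ((m : Int) + 1) + 1 := by push_cast; ring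
    rw [hcast, PySem.List.pyRange_one_succ_right (by omega : (1:Int) ≤ (m : Int) + 1),
        List.foldl_append, ih (by omega), List.foldl_cons, List.foldl_nil]
    have h1 : 0 ≤ (cp.length : Int) - ((m : Int) + 1) := by omega
    have h2 : (cp.length : Int) - ((m : Int) + 1) < cp.length := by omega
    have h3 : 0 ≤ (t : Int) - ((m : Int) + 1) := by omega
    have h4 : (t : Int) - ((m : Int) + 1) < cp.length := by omega
    have e1 : PySem.List.pyGetD cp ((cp.length : Int) - ((m : Int) + 1)) 0
        = cp.getD (cp.length - (m + 1)) 0 := by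
      rw [show ((cp.length : Int) - ((m : Int) + 1)) = ((cp.length - (m + 1) : Nat) : Int) from by omega]
      rw [PySem.List.pyGetD_natCast]
    have e2 : PySem.List.pyGetD cp ((t : Int) - ((m : Int) + 1)) 0
        = cp.getD (t - (m + 1)) 0 := by
      rw [show ((t : Int) - ((m : Int) + 1)) = ((t - (m + 1) : Nat) : Int) from by omega]
      rw [PySem.List.pyGetD_natCast]
    have hs : pvG cp t (t - m) + PySem.List.pyGetD cp ((cp.length : Int) - ((m : Int) + 1)) 0
        - PySem.List.pyGetD cp ((t : Int) - ((m : Int) + 1)) 0 = pvG cp t (t - (m + 1)) := by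
      rw [e1, e2, pvG_step cp t (m + 1) (by omega) (by omega) ht]
      rw [show t - (m + 1) + 1 = t - m from by omega]
    simp only []
    rw [hs, Prod.mk.injEq]
    refine ⟨?_, rfl⟩
    rw [pvMaxOver]
    rcases le_or_gt (pvG cp t (t - (m + 1))) (pvMaxOver (fun i => pvG cp t (t - i)) m) with h | h
    · rw [if_neg (by omega), max_eq_left h]
    · rw [if_pos h, max_eq_right (le_of_lt h)]

theorem pvAlt_eq_pvF (cp : List Int) (k : Int) (cache : Option (List (List Int × Int × Int)))
    (hk : 0 ≤ k) : recursive_subproblem_alt cp k cache = pvF cp k := by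
  unfold recursive_subproblem_alt
  have hts : min k ((cp.length : Int)) = ((pvT cp k : Nat) : Int) := by
    unfold pvT; split_ifs <;> push_cast <;> omega
  have hs0 : (cp.take (pvT cp k)).sum = pvG cp (pvT cp k) (pvT cp k) := by
    unfold pvG
    simp [Nat.sub_self, List.drop_length]
  simp only [PySem.List.len_eq, hts, PySem.List.slice_to_natCast, hs0]
  rw [pvLoopLem cp (pvT cp k) (pvT_le cp k) (pvT cp k) (le_refl _)]
  show pvMaxOver (fun i => pvG cp (pvT cp k) (pvT cp k - i)) (pvT cp k) = pvF cp k
  rw [pvMaxOver_reflect]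
  rfl

-- ===== VERDICT (by name: the statement is the Claim_ definition above) =====
theorem recursive_subproblem_spec : Claim_equal_recursive_subproblem := by
  intro cp k cache _ hp
  obtain ⟨hk, hp2⟩ := hp
  unfold Spec_recursive_subproblem recursive_subproblem
  rw [pvAlt_eq_pvF cp k cache hk]
  exact (pvGoA_correct cp k cp.length cp k (pvInitCache cache) (le_refl _)
    (List.infix_refl cp) (by simp) (pvInitCache_inv cp k cache hp2)).1
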